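-- pv_equiv track=rewrite | github.com/DevSpace88/market_data_app | backend/app/services/unusual_activity_service.py | _calculate_overall_severity
-- ===== SOURCE A (Python) =====
-- from typing import Dict, List, Any, Optional
--
-- def _calculate_overall_severity(activities: List[Dict]) -> str:
--     """Calculate overall severity from all activities"""
--     if not activities:
--         return "NONE"
--
--     severity_weights = {"EXTREME": 4, "HIGH": 3, "MEDIUM": 2, "LOW": 1}
--
--     max_weight = max(
--         (severity_weights.get(a.get("severity", "LOW"), 1) for a in activities),
--         default=0
--     )
--
--     if max_weight >= 4:
--         return "EXTREME"
--     elif max_weight >= 3: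
--         return "HIGH"
--     elif max_weight >= 2:
--         return "MEDIUM"
--     else:
--         return "LOW"
-- ===== SOURCE B (Python) =====
-- def _calculate_overall_severity(activities):
--     """Calculate overall severity from all activities"""
--     if not activities:
--         return "NONE"
--     present = {a.get("severity", "LOW") for a in activities}
--     for label in ("EXTREME", "HIGH", "MEDIUM", "LOW"):
--         if label in present:
--             return label
--     return "LOW"
-- ===== Notes on version B (the rewrite author's own statement) =====
-- stated objective: idiomatic
-- what changed: Replaced the numeric severity-weight max plus threshold cascade by building the set of severity labels present and returning the first label of the fixed priority list found in it (falling back to LOW for unknown labels).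
import Mathlib
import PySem

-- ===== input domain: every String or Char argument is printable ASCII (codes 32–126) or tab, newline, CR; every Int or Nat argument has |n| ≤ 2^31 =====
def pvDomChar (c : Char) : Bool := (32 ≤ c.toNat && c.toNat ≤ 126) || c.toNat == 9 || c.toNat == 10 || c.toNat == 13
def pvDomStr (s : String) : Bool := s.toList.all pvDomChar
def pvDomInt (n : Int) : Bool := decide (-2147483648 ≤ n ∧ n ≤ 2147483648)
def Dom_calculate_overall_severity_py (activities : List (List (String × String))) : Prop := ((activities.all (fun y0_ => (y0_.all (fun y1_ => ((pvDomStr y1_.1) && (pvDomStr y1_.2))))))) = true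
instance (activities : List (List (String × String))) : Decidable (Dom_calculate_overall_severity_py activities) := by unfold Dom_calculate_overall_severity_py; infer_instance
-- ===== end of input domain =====

-- B replaces the numeric-weight max and threshold cascade by a set of present labels
-- scanned in fixed priority order (objective: more idiomatic; same behaviour).


-- ===== PORT A =====
-- a.get("severity", "LOW")
def pvSevOf (a : List (String × String)) : String :=
  PySem.Dict.getD (PySem.Dict.mk a) "severity" "LOW"

-- severity_weights = {"EXTREME": 4, "HIGH": 3, "MEDIUM": 2, "LOW": 1}
def pvSevWeights : PySem.Dict String Int :=
  PySem.Dict.mk [("EXTREME", 4), ("HIGH", 3), ("MEDIUM", 2), ("LOW", 1)]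

def calculate_overall_severity_py (activities : List (List (String × String))) : String :=
  if activities = [] then "NONE"
  else
    let max_weight :=
      (PySem.List.max? (activities.map (fun a => PySem.Dict.getD pvSevWeights (pvSevOf a) 1))
        (fun x => x)).getD 0
    if max_weight ≥ 4 then "EXTREME"
    else if max_weight ≥ 3 then "HIGH"
    else if max_weight ≥ 2 then "MEDIUM"
    else "LOW"

-- ===== PORT B =====
def calculate_overall_severity_py_alt (activities : List (List (String × String))) : String :=
  if activities = [] then "NONE"
  else
    let present : PySem.Set String := PySem.Set.ofList (activities.map pvSevOf)
    match (["EXTREME", "HIGH", "MEDIUM", "LOW"] : List String).find?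
        (fun l => PySem.Set.contains present l) with
    | some l => l
    | none => "LOW"

-- ===== PRECONDITION & SPEC =====
def Spec_calculate_overall_severity_py (activities : List (List (String × String))) (out : String) : Prop := out = calculate_overall_severity_py_alt activities
instance (activities : List (List (String × String))) (out : String) : Decidable (Spec_calculate_overall_severity_py activities out) := by unfold Spec_calculate_overall_severity_py; infer_instance

-- ===== CLAIM (what is proved, stated in full; the proofs are below) =====
def Claim_equal_calculate_overall_severity_py : Prop := ∀ (activities : List (List (String × String))), Dom_calculate_overall_severity_py activities → Spec_calculate_overall_severity_py activities (calculate_overall_severity_py activities)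

-- ===== LEMMAS AND PROOFS =====

def pvW (s : String) : Int := PySem.Dict.getD pvSevWeights s 1

theorem pvW_spec (s : String) :
    pvW s = if s = "EXTREME" then 4 else if s = "HIGH" then 3 else if s = "MEDIUM" then 2 else 1 := by
  simp only [pvW, pvSevWeights, PySem.Dict.getD_eq_get?_getD]
  rw [PySem.Dict.get?_mk_cons, PySem.Dict.get?_mk_cons, PySem.Dict.get?_mk_cons,
    PySem.Dict.get?_mk_cons,
    show ((PySem.Dict.mk ([] : List (String × Int))).get? s) = none from rfl]
  simp only [beq_iff_eq]
  split_ifs <;> first | rfl | tauto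

theorem pvW_eq4 (s : String) : 4 ≤ pvW s ↔ s = "EXTREME" := by
  rw [pvW_spec]; split_ifs <;> simp_all

theorem pvW_ge3 (s : String) : 3 ≤ pvW s ↔ s = "EXTREME" ∨ s = "HIGH" := by
  rw [pvW_spec]; split_ifs <;> simp_all

theorem pvW_ge2 (s : String) : 2 ≤ pvW s ↔ s = "EXTREME" ∨ s = "HIGH" ∨ s = "MEDIUM" := by
  rw [pvW_spec]; split_ifs <;> simp_all

theorem pv_core (x : List String) (hx : x ≠ []) :
    (let m := (PySem.List.max? (x.map pvW) (fun y => y)).getD 0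
     if m ≥ 4 then "EXTREME" else if m ≥ 3 then "HIGH" else if m ≥ 2 then "MEDIUM" else ("LOW" : String))
    = (match (["EXTREME", "HIGH", "MEDIUM", "LOW"] : List String).find?
          (fun l => PySem.Set.contains (PySem.Set.ofList x) l) with
       | some l => l
       | none => "LOW") := by
  have hmapne : x.map pvW ≠ [] := by simpa using hx
  obtain ⟨m, hm⟩ : ∃ m, PySem.List.max? (x.map pvW) (fun y => y) = some m := by
    cases h : PySem.List.max? (x.map pvW) (fun y => y) with
    | none => exact absurd ((PySem.List.max?_eq_none_iff _ _).mp h) hmapne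
    | some m => exact ⟨m, rfl⟩
  have hmem := PySem.List.max?_mem hm
  have hmax := PySem.List.max?_isMax hm
  obtain ⟨y0, hy0, hy0m⟩ := List.mem_map.mp hmem
  have hcont : ∀ l : String, PySem.Set.contains (PySem.Set.ofList x) l = decide (l ∈ x) := by
    intro l
    by_cases h : l ∈ x
    · simp [h]
    · simp only [h, decide_false]
      by_contra hc
      exact h ((PySem.Set.mem_ofList _ _).mp ((PySem.Set.contains_iff _ _).mp (by simpa using hc)))
  have hle : ∀ s ∈ x, pvW s ≤ m := fun s hs => hmax _ (List.mem_map_of_mem hs)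
  simp only [List.find?, hcont, hm, Option.getD_some]
  by_cases hE : "EXTREME" ∈ x
  · have h4 : 4 ≤ m := le_trans (by rw [pvW_eq4]) (hle _ hE)
    simp [h4, hE]
  · have hm4 : ¬ (4 ≤ m) := by
      intro h4
      have hy : y0 = "EXTREME" := Iff.mp (pvW_eq4 y0) (by rw [hy0m]; exact h4)
      exact hE (hy ▸ hy0)
    by_cases hH : "HIGH" ∈ x
    · have h3 : 3 ≤ m := le_trans (by rw [pvW_ge3]; right; rfl) (hle _ hH)
      simp [hm4, h3, hE, hH]
    · have hm3 : ¬ (3 ≤ m) := by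
        intro h3
        rcases Iff.mp (pvW_ge3 y0) (by rw [hy0m]; exact h3) with h | h
        · exact hE (h ▸ hy0)
        · exact hH (h ▸ hy0)
      by_cases hM : "MEDIUM" ∈ x
      · have h2 : 2 ≤ m := le_trans (by rw [pvW_ge2]; right; right; rfl) (hle _ hM)
        simp [hm4, hm3, h2, hE, hH, hM]
      · have hm2 : ¬ (2 ≤ m) := by
          intro h2
          rcases Iff.mp (pvW_ge2 y0) (by rw [hy0m]; exact h2) with h | h | h
          · exact hE (h ▸ hy0)
          · exact hH (h ▸ hy0)
          · exact hM (h ▸ hy0)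
        by_cases hL : "LOW" ∈ x <;> simp [hm4, hm3, hm2, hE, hH, hM, hL]

-- ===== VERDICT (by name: the statement is the Claim_ definition above) =====
theorem calculate_overall_severity_py_spec : Claim_equal_calculate_overall_severity_py := by
  intro activities _
  unfold Spec_calculate_overall_severity_py
  unfold calculate_overall_severity_py calculate_overall_severity_py_alt
  by_cases h : activities = []
  · simp [h]
  · simp only [h, if_false]
    have hmm : (activities.map pvSevOf).map pvW
        = activities.map (fun a => PySem.Dict.getD pvSevWeights (pvSevOf a) 1) := by
      rw [List.map_map]; rfl
    have hcore := pv_core (activities.map pvSevOf) (by simpa using h)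
    rw [hmm] at hcore
    exact hcore
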